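-- pv_equiv track=rewrite | github.com/ehtbanton/AutoPDD | src/backend/src/text_processing.py | find_target_location
-- ===== SOURCE A (Python) =====
-- def find_target_location(target,template_text):
--     char_count = 0
--     start_location = -1
--     for line in template_text.splitlines():
--         if line.strip() == target[1]:  # Found the line containing only target[1]
--             start_location = char_count + line.find(target[1])
--             break
--         char_count += len(line) + 1  # +1 for the newline character
--
--     if start_location == -1:
--         start_location = template_text.find(target[1])  # Fallback to original method
--     return start_location
-- ===== SOURCE B (Python) =====
-- def find_target_location(target, template_text):
--     tgt = target[1]
--     text = template_text
--     n = len(text)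
--     start = 0
--     while start < n:
--         j = start
--         while j < n and text[j] != '\n' and text[j] != '\r':
--             j += 1
--         line = text[start:j]
--         if line.strip() == tgt:
--             return start + line.find(tgt)
--         sep = 2 if text[j:j + 2] == '\r\n' else (1 if j < n else 0)
--         start = j + sep
--     return template_text.find(tgt)
-- ===== Notes on version B (the rewrite author's own statement) =====
-- stated objective: alternative
-- what changed: B abandons splitlines plus a '+1 per line' running accumulator: it walks the raw text with index arithmetic, finding each line's end and its actual terminator ('\n', '\r' or '\r\n'), so the returned offset is the matching line's true character position; A instead counts every line break as one character, which undercounts after a '\r\n'.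
-- intended difference: On texts whose first line with strip() equal to target[1] lies after a '\r\n' line break, A returns an offset that is short by one per preceding '\r\n' (it adds len(line)+1 for every line), while B returns the true character offset of the match, which is what a caller indexing into template_text needs. — e.g. on find_target_location(["", "b"], "a\r\nb"): A returns 2, B returns 3
import Mathlib
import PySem

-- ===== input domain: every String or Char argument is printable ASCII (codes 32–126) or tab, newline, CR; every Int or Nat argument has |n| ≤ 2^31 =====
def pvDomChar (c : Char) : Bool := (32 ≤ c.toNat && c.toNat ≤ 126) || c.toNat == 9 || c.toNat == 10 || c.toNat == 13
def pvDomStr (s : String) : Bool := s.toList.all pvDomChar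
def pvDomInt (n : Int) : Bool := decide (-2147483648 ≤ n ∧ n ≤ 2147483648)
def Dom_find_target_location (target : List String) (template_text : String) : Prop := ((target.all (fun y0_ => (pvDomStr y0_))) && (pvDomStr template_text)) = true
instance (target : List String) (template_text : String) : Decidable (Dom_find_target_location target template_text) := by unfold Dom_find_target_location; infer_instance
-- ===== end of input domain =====

-- B scans the raw text with true character positions (explicit '\n'/'\r'/'\r\n' terminator
-- handling) instead of A's splitlines + uniform "+1 per line" accumulator; on texts whose
-- matching line sits after a "\r\n", B returns the true offset where A undercounts (D_ below).

-- ===== PORT A =====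
-- A's for-loop with its running char_count and break; returns -1 if no line matched.
def pvLoopA (tgt : String) (cc : Int) : List String → Int
  | [] => -1
  | l :: rest =>
    if PySem.Str.strip l == tgt then cc + PySem.Str.find l tgt
    else pvLoopA tgt (cc + PySem.Str.len l + 1) rest

def find_target_location (target : List String) (template_text : String) : Int :=
  match PySem.List.pyGet? target 1 with
  | none => 0  -- unreachable under Pre_: Python raises IndexError here
  | some tgt =>
    let start_location := pvLoopA tgt 0 (PySem.Str.splitlines template_text)
    if start_location == -1 then PySem.Str.find template_text tgt else start_location

-- ===== PORT B =====
-- inner while: advance j while j < n and text[j] is not '\n'/'\r'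
def pvLineEnd (cs : List Char) (n : Nat) (j : Nat) : Nat :=
  if j < n && !(cs.getD j ' ' == '\n') && !(cs.getD j ' ' == '\r') then pvLineEnd cs n (j + 1)
  else j
termination_by n - j
decreasing_by simp_all; omega

lemma pvLineEnd_ge (cs : List Char) (n j : Nat) : j ≤ pvLineEnd cs n j := by
  unfold pvLineEnd
  split
  · have := pvLineEnd_ge cs n (j + 1); omega
  · exact le_refl j
termination_by n - j
decreasing_by simp_all; omega

-- outer while loop of B, carrying the true position `start`; `none` = fell through the loop
def pvScanGo (tgt : List Char) (cs : List Char) (n : Nat) (start : Nat) : Option Int :=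
  if start < n then
    let j := pvLineEnd cs n start
    let line := PySem.List.slice cs (some (start : Int)) (some (j : Int))
    if PySem.Chars.strip line == tgt then some ((start : Int) + PySem.Chars.find line tgt)
    else
      let sep : Nat :=
        if PySem.List.slice cs (some (j : Int)) (some ((j : Int) + 2)) = ['\r', '\n'] then 2
        else if j < n then 1 else 0
      pvScanGo tgt cs n (j + sep)
  else none
termination_by n - start
decreasing_by
  have hge := pvLineEnd_ge cs n start
  split_ifs <;> omega

def find_target_location_alt (target : List String) (template_text : String) : Int :=
  match PySem.List.pyGet? target 1 with
  | none => 0  -- unreachable under Pre_: Python raises IndexError here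
  | some tgt =>
    match pvScanGo tgt.toList template_text.toList template_text.toList.length 0 with
    | some v => v
    | none => PySem.Str.find template_text tgt

-- ===== PRECONDITION & SPEC =====
-- Pre_ excludes only target lists of length < 2, on which Python A raises IndexError at target[1].
def Pre_find_target_location (target : List String) (template_text : String) : Prop :=
  2 ≤ target.length
instance (target : List String) (template_text : String) : Decidable (Pre_find_target_location target template_text) := by unfold Pre_find_target_location; infer_instance

def pvWitness_find_target_location : List String × String := (["x", "b"], " b \na\n")

-- input-inspection helper for D_ (independent of both ports): the text's lines paired with
-- their actual terminators ('\n', '\r' or '\r\n'; the last line may have none)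
def pvParts : List Char → List (List Char × List Char)
  | [] => []
  | '\r' :: '\n' :: rest => ([], ['\r', '\n']) :: pvParts rest
  | c :: rest =>
    if c = '\n' || c = '\r' then ([], [c]) :: pvParts rest
    else
      match pvParts rest with
      | [] => [([c], [])]
      | (l, s) :: tl => (c :: l, s) :: tl

def pvD (target : List String) (template_text : String) : Bool :=
  match PySem.List.pyGet? target 1 with
  | none => false
  | some tgt =>
    let parts := pvParts template_text.toList
    match parts.findIdx? (fun p => PySem.Chars.strip p.1 == tgt.toList) with
    | none => false
    | some i => (parts.take i).any (fun p => p.2 == ['\r', '\n'])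

-- On texts where the first line whose strip() equals target[1] lies after a "\r\n" line break,
-- A counts every break as one character and returns an offset that is too small; B returns the
-- true character offset of the match, which is what a caller indexing into template_text needs.
def D_find_target_location (target : List String) (template_text : String) : Prop :=
  pvD target template_text = true
instance (target : List String) (template_text : String) : Decidable (D_find_target_location target template_text) := by unfold D_find_target_location; infer_instance

def Spec_find_target_location (target : List String) (template_text : String) (out : Int) : Prop := ¬ D_find_target_location target template_text → out = find_target_location_alt target template_text
instance (target : List String) (template_text : String) (out : Int) : Decidable (Spec_find_target_location target template_text out) := by unfold Spec_find_target_location; infer_instance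

def pvDiffWitness_find_target_location : List String × String := (["", "b"], "a\r\nb")
def pvDiffWitnessOut_find_target_location : Int × Int := (2, 3)

-- ===== CLAIM (what is proved, stated in full; the proofs are below) =====
def Claim_unchanged_find_target_location : Prop := ∀ (target : List String) (template_text : String), Dom_find_target_location target template_text → Pre_find_target_location target template_text → Spec_find_target_location target template_text (find_target_location target template_text)
def Claim_changed_find_target_location : Prop := Dom_find_target_location (pvDiffWitness_find_target_location.1) (pvDiffWitness_find_target_location.2) ∧ Pre_find_target_location (pvDiffWitness_find_target_location.1) (pvDiffWitness_find_target_location.2) ∧ D_find_target_location (pvDiffWitness_find_target_location.1) (pvDiffWitness_find_target_location.2) ∧ find_target_location (pvDiffWitness_find_target_location.1) (pvDiffWitness_find_target_location.2) = pvDiffWitnessOut_find_target_location.1 ∧ find_target_location_alt (pvDiffWitness_find_target_location.1) (pvDiffWitness_find_target_location.2) = pvDiffWitnessOut_find_target_location.2 ∧ pvDiffWitnessOut_find_target_location.1 ≠ pvDiffWitnessOut_find_target_location.2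
def Claim_exact_find_target_location : Prop := ∀ (target : List String) (template_text : String), Dom_find_target_location target template_text → Pre_find_target_location target template_text → D_find_target_location target template_text → find_target_location target template_text ≠ find_target_location_alt target template_text

-- ===== LEMMAS AND PROOFS =====

-- ---------- basic helpers on pvParts / line scanning ----------

-- length of the first line (up to the first '\n' or '\r')
def pvLineLen : List Char → Nat
  | [] => 0
  | c :: r => if c = '\n' || c = '\r' then 0 else pvLineLen r + 1

-- the terminator sitting at the start of a list (used at the break position)
def pvSep : List Char → List Char
  | [] => []
  | '\r' :: '\n' :: _ => ['\r', '\n']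
  | c :: _ => [c]

-- structural counterpart of B's outer loop, over pvParts, with absolute positions
def pvPartsScan (tgt : List Char) : List (List Char × List Char) → Nat → Option Int
  | [], _ => none
  | (l, s) :: tl, pos =>
    if PySem.Chars.strip l == tgt then some ((pos : Int) + PySem.Chars.find l tgt)
    else pvPartsScan tgt tl (pos + l.length + s.length)

lemma pvLineLen_le (ds : List Char) : pvLineLen ds ≤ ds.length := by
  induction ds with
  | nil => simp [pvLineLen]
  | cons c r ih => simp only [pvLineLen]; split <;> simp <;> omega

lemma pvParts_cons (c : Char) (rest : List Char)
    (hnot : ∀ r', ¬(c = '\r' ∧ rest = '\n' :: r')) :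
    pvParts (c :: rest) =
      if c = '\n' || c = '\r' then ([], [c]) :: pvParts rest
      else
        match pvParts rest with
        | [] => [([c], [])]
        | (l, s) :: tl => (c :: l, s) :: tl := by
  rw [pvParts.eq_def]
  split
  · rename_i x heq; exact absurd heq (by simp)
  · rename_i x r' heq
    injection heq with h1 h2
    exact absurd ⟨h1, h2⟩ (hnot r')
  · rename_i x c' r' hprev heq
    injection heq with h1 h2
    subst h1; subst h2; rfl

lemma pvLineEnd_eq (cs : List Char) (j : Nat) :
    pvLineEnd cs cs.length j = j + pvLineLen (cs.drop j) := by
  unfold pvLineEnd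
  by_cases hj : j < cs.length
  · cases hds : cs.drop j with
    | nil => exact absurd (List.drop_eq_nil_iff.mp hds) (by omega)
    | cons c r =>
      have h0 : cs[j]? = some c := by
        have h1 := List.getElem?_drop (xs := cs) (i := j) (j := 0)
        rw [hds] at h1
        simpa using h1.symm
      have hget : cs.getD j ' ' = c := by
        rw [List.getD_eq_getElem?_getD, h0]; rfl
      by_cases hc : c = '\n' ∨ c = '\r'
      · have hcond : (j < cs.length && !(cs.getD j ' ' == '\n') && !(cs.getD j ' ' == '\r')) = false := by
          rw [hget]
          rcases hc with hc | hc <;> subst hc <;> simp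
        simp only [hcond, Bool.false_eq_true, if_false]
        rcases hc with hc | hc <;> subst hc <;> simp [pvLineLen]
      · push_neg at hc
        have hcond : (j < cs.length && !(cs.getD j ' ' == '\n') && !(cs.getD j ' ' == '\r')) = true := by
          rw [hget]
          simp [hj, hc.1, hc.2]
        simp only [hcond, if_true]
        have ih := pvLineEnd_eq cs (j + 1)
        have hdr : cs.drop (j + 1) = r := by
          have h1 : cs.drop (j + 1) = (cs.drop j).drop 1 := by rw [List.drop_drop]
          rw [h1, hds]; rfl
        rw [ih, hdr]
        simp [pvLineLen, hc.1, hc.2]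
        omega
  · have hds : cs.drop j = [] := List.drop_eq_nil_iff.mpr (by omega)
    simp [hj, hds, pvLineLen]
termination_by cs.length - j
decreasing_by omega

-- one-step decomposition of pvParts for a nonempty list
lemma pvParts_decomp (ds : List Char) (hne : ds ≠ []) :
    pvParts ds =
      (ds.take (pvLineLen ds), pvSep (ds.drop (pvLineLen ds)))
        :: pvParts (ds.drop (pvLineLen ds + (pvSep (ds.drop (pvLineLen ds))).length)) := by
  induction ds using pvParts.induct with
  | case1 => simp at hne
  | case2 rest _ =>
    simp [pvParts, pvLineLen, pvSep]
  | case3 c rest hne2 hbrk _ =>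
    have hnot : ∀ r', ¬(c = '\r' ∧ rest = '\n' :: r') := fun r' h => hne2 r' h.1 h.2
    rw [pvParts_cons c rest hnot, if_pos hbrk]
    have hc : c = '\n' ∨ c = '\r' := by simpa using hbrk
    have hL : pvLineLen (c :: rest) = 0 := by
      rcases hc with hc | hc <;> simp [pvLineLen, hc]
    have hsep : pvSep (c :: rest) = [c] := by
      rw [pvSep.eq_def]
      split
      · rename_i heq; exact absurd heq (by simp)
      · rename_i x r' heq
        injection heq with h1 h2
        exact (hne2 r' h1 h2).elim
      · rename_i x c' r' hprev heq
        injection heq with h1 h2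
        rw [h1]
    simp [hL, hsep]
  | case4 c rest hne2 hbrk hrest ih =>
    have hnot : ∀ r', ¬(c = '\r' ∧ rest = '\n' :: r') := fun r' h => hne2 r' h.1 h.2
    have hc : ¬(c = '\n' ∨ c = '\r') := by simpa using hbrk
    push_neg at hc
    have hrnil : rest = [] := by
      by_contra hr
      rw [ih hr] at hrest
      exact absurd hrest (by simp)
    subst hrnil
    rw [pvParts_cons c [] hnot, if_neg (by simpa using hbrk)]
    simp [pvParts, pvLineLen, pvSep, hc.1, hc.2]
  | case5 c rest hne2 hbrk l s tl hrest ih =>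
    have hnot : ∀ r', ¬(c = '\r' ∧ rest = '\n' :: r') := fun r' h => hne2 r' h.1 h.2
    have hc : ¬(c = '\n' ∨ c = '\r') := by simpa using hbrk
    push_neg at hc
    have hrne : rest ≠ [] := by
      intro h; rw [h] at hrest; simp [pvParts] at hrest
    have hdec := ih hrne
    rw [hrest] at hdec
    have hl : l = rest.take (pvLineLen rest) := by
      injection hdec with h1 h2; injection h1
    have hs : s = pvSep (rest.drop (pvLineLen rest)) := by
      injection hdec with h1 h2; injection h1
    have htl : tl = pvParts (rest.drop (pvLineLen rest + (pvSep (rest.drop (pvLineLen rest))).length)) := by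
      injection hdec with h1 h2
    rw [pvParts_cons c rest hnot, if_neg (by simpa using hbrk), hrest]
    have hL : pvLineLen (c :: rest) = pvLineLen rest + 1 := by
      simp [pvLineLen, hc.1, hc.2]
    have hdrop : ∀ k, (c :: rest).drop (k + 1) = rest.drop k := fun k => rfl
    simp only [hL, hdrop]
    have htake : (c :: rest).take (pvLineLen rest + 1) = c :: rest.take (pvLineLen rest) := rfl
    rw [htake, ← hl, ← hs]
    rw [show pvLineLen rest + 1 + s.length = (pvLineLen rest + s.length) + 1 from by omega,
        hdrop (pvLineLen rest + s.length), hs, htl]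

lemma pvSep_cons (c : Char) (r : List Char)
    (hnot : ∀ r', ¬(c = '\r' ∧ r = '\n' :: r')) : pvSep (c :: r) = [c] := by
  rw [pvSep.eq_def]
  split
  · rename_i heq; exact absurd heq (by simp)
  · rename_i x r' heq
    injection heq with h1 h2
    exact ((hnot r') ⟨h1, h2⟩).elim
  · rename_i x c' r' hprev heq
    injection heq with h1 h2
    rw [h1]

-- bridge: B's index loop equals the structural scan over pvParts
lemma pvScanGo_eq (tgt cs : List Char) (start : Nat) :
    pvScanGo tgt cs cs.length start = pvPartsScan tgt (pvParts (cs.drop start)) start := by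
  rw [pvScanGo]
  by_cases hst : start < cs.length
  · have hdne : cs.drop start ≠ [] := by
      intro h
      have := List.drop_eq_nil_iff.mp h
      omega
    have hL := pvLineEnd_eq cs start
    have hLle : pvLineLen (cs.drop start) ≤ (cs.drop start).length := pvLineLen_le _
    have hdlen : (cs.drop start).length = cs.length - start := List.length_drop
    -- the sliced line is the first pvLineLen chars of the remainder
    have hline : PySem.List.slice cs (some (start : Int)) (some ((pvLineEnd cs cs.length start : Nat) : Int))
        = (cs.drop start).take (pvLineLen (cs.drop start)) := by
      rw [PySem.List.slice_natCast, hL]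
      congr 1
      omega
    have hdj : cs.drop (pvLineEnd cs cs.length start) = (cs.drop start).drop (pvLineLen (cs.drop start)) := by
      rw [List.drop_drop, hL, Nat.add_comm]
    have hsepslice : PySem.List.slice cs (some ((pvLineEnd cs cs.length start : Nat) : Int))
          (some (((pvLineEnd cs cs.length start : Nat) : Int) + 2))
        = ((cs.drop start).drop (pvLineLen (cs.drop start))).take 2 := by
      rw [show (((pvLineEnd cs cs.length start : Nat) : Int) + 2)
            = (((pvLineEnd cs cs.length start + 2 : Nat) : Nat) : Int) from by push_cast; ring,
          PySem.List.slice_natCast, ← hdj]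
      congr 1
      omega
    have hsep : (if PySem.List.slice cs (some ((pvLineEnd cs cs.length start : Nat) : Int))
          (some (((pvLineEnd cs cs.length start : Nat) : Int) + 2)) = ['\r', '\n'] then 2
        else if pvLineEnd cs cs.length start < cs.length then 1 else 0)
        = (pvSep ((cs.drop start).drop (pvLineLen (cs.drop start)))).length := by
      rw [hsepslice]
      cases hes : (cs.drop start).drop (pvLineLen (cs.drop start)) with
      | nil =>
        have hj : ¬ pvLineEnd cs cs.length start < cs.length := by
          have := List.drop_eq_nil_iff.mp hes
          omega
        simp [hj, pvSep]
      | cons e es =>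
        have hj : pvLineEnd cs cs.length start < cs.length := by
          have h1 : ((cs.drop start).drop (pvLineLen (cs.drop start))).length > 0 := by
            rw [hes]; simp
          have h2 : ((cs.drop start).drop (pvLineLen (cs.drop start))).length
              = (cs.drop start).length - pvLineLen (cs.drop start) := List.length_drop
          omega
        by_cases hrn : ∃ es', e :: es = '\r' :: '\n' :: es'
        · obtain ⟨es', hes'⟩ := hrn
          rw [hes']
          simp [pvSep]
        · have hne2 : ∀ r', ¬(e = '\r' ∧ es = '\n' :: r') := by
            intro r' ⟨h1, h2⟩
            exact hrn ⟨r', by rw [h1, h2]⟩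
          have htk : ¬ (e :: es).take 2 = ['\r', '\n'] := by
            cases es with
            | nil => intro hcontra; exact absurd (congrArg List.length hcontra) (by simp)
            | cons f fs =>
              intro hcontra
              rw [show (e :: f :: fs).take 2 = [e, f] from rfl] at hcontra
              injection hcontra with ha hb
              injection hb with hb _
              exact hne2 fs ⟨ha, by rw [hb]⟩
          rw [pvSep_cons e es hne2, if_neg htk, if_pos hj]
          rfl
    rw [if_pos hst]
    dsimp only
    rw [hline, hsep, pvParts_decomp (cs.drop start) hdne]
    simp only [pvPartsScan]
    by_cases hm : (PySem.Chars.strip ((cs.drop start).take (pvLineLen (cs.drop start))) == tgt) = true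
    · rw [if_pos hm, if_pos hm]
    · rw [if_neg hm, if_neg hm]
      have hrec := pvScanGo_eq tgt cs
        (pvLineEnd cs cs.length start + (pvSep ((cs.drop start).drop (pvLineLen (cs.drop start)))).length)
      rw [hrec]
      have hdrop2 : ∀ k, cs.drop (pvLineEnd cs cs.length start + k)
          = (cs.drop start).drop (pvLineLen (cs.drop start) + k) := by
        intro k
        rw [List.drop_drop, hL]
        congr 1
        omega
      rw [hdrop2]
      congr 1
      have htklen : ((cs.drop start).take (pvLineLen (cs.drop start))).length = pvLineLen (cs.drop start) := by
        rw [List.length_take]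
        omega
      rw [htklen, hL]
  · rw [if_neg hst]
    have hds : cs.drop start = [] := List.drop_eq_nil_iff.mpr (by omega)
    rw [hds, show pvParts ([] : List Char) = [] from rfl]
    rfl
termination_by cs.length - start
decreasing_by
  have := pvLineEnd_eq cs start
  have h2 : ((cs.drop start).drop (pvLineLen (cs.drop start))).length
      = (cs.drop start).length - pvLineLen (cs.drop start) := List.length_drop
  have h3 : (cs.drop start).length = cs.length - start := List.length_drop
  have h5 : pvLineLen (cs.drop start) ≤ (cs.drop start).length := pvLineLen_le _
  have key : 1 ≤ (pvSep ((cs.drop start).drop (pvLineLen (cs.drop start)))).length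
      ∨ pvLineLen (cs.drop start) ≥ (cs.drop start).length := by
    cases hes2 : (cs.drop start).drop (pvLineLen (cs.drop start)) with
    | nil =>
      right
      have hlen := congrArg List.length hes2
      rw [List.length_drop] at hlen
      simp at hlen
      omega
    | cons e es =>
      left
      rw [pvSep.eq_def]
      split <;> simp_all
  omega

-- A's loop, characterised by the index of the first matching line
lemma pv_loopA_eq (tgt : String) (lines : List String) : ∀ (cc : Int),
    pvLoopA tgt cc lines =
      match lines.findIdx? (fun l => PySem.Str.strip l == tgt) with
      | none => -1
      | some i => cc + ((lines.take i).map (fun l => PySem.Str.len l + 1)).sum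
                    + PySem.Str.find (lines.getD i "") tgt := by
  induction lines with
  | nil => intro cc; simp [pvLoopA]
  | cons l rest ih =>
    intro cc
    rw [List.findIdx?_cons]
    by_cases hp : (PySem.Str.strip l == tgt) = true
    · simp [pvLoopA, hp]
    · simp only [hp]
      rw [pvLoopA, if_neg (by simp [hp])]
      rw [ih (cc + PySem.Str.len l + 1)]
      cases hfi : rest.findIdx? (fun l => PySem.Str.strip l == tgt) with
      | none => simp
      | some i =>
        simp only [Option.map_some]
        simp [List.sum_cons]
        ring

-- pvPartsScan, characterised the same way
lemma pvPartsScan_eq (tgt : List Char) (parts : List (List Char × List Char)) : ∀ (pos : Nat),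
    pvPartsScan tgt parts pos =
      match parts.findIdx? (fun p => PySem.Chars.strip p.1 == tgt) with
      | none => none
      | some i => some ((pos : Int)
          + ((parts.take i).map (fun p => (p.1.length : Int) + p.2.length)).sum
          + PySem.Chars.find (parts.getD i ([], [])).1 tgt) := by
  induction parts with
  | nil => intro pos; simp [pvPartsScan]
  | cons p tl ih =>
    intro pos
    obtain ⟨l, s⟩ := p
    rw [List.findIdx?_cons]
    by_cases hp : (PySem.Chars.strip l == tgt) = true
    · simp [pvPartsScan, hp]
    · simp only [hp]
      simp only [pvPartsScan]
      rw [if_neg (by simp [hp]), ih (pos + l.length + s.length)]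
      cases hfi : tl.findIdx? (fun p => PySem.Chars.strip p.1 == tgt) with
      | none => simp
      | some i =>
        simp only [Option.map_some]
        simp [List.sum_cons]
        ring

-- strip s is a contiguous piece of s
lemma pv_strip_infix (s : List Char) : PySem.Chars.strip s <:+: s := by
  have h1 : PySem.Chars.rstrip (PySem.Chars.lstrip s) <+: PySem.Chars.lstrip s := by
    rw [← List.reverse_suffix]
    simp [PySem.Chars.rstrip]
    exact List.dropWhile_suffix _
  have h2 : PySem.Chars.lstrip s <:+ s := List.dropWhile_suffix _
  exact h1.isInfix.trans h2.isInfix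

-- what the go-accumulator ends up contributing, phrased through pvParts
def pvH (p : List Char) (cs : List Char) : List (List Char) :=
  match pvParts cs with
  | [] => if p = [] then [] else [p]
  | (l, _) :: tl => (p ++ l) :: tl.map Prod.fst

lemma pvH_nil (cs : List Char) : pvH [] cs = (pvParts cs).map Prod.fst := by
  unfold pvH
  cases pvParts cs with
  | nil => simp
  | cons q tl => obtain ⟨l, s⟩ := q; simp

lemma pv_go_cons (isB : Char → Bool) (c : Char) (rest : List Char) (cur : List Char) (acc : List (List Char))
    (hnot : ∀ r', ¬(c = '\r' ∧ rest = '\n' :: r')) :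
    PySem.Chars.splitlines.go isB (c :: rest) cur acc =
      if isB c then PySem.Chars.splitlines.go isB rest [] (cur.reverse :: acc)
      else PySem.Chars.splitlines.go isB rest (c :: cur) acc := by
  rw [PySem.Chars.splitlines.go.eq_def]
  split
  · rename_i heq; exact absurd heq (by simp)
  · rename_i x r' heq
    injection heq with h1 h2
    exact absurd ⟨h1, h2⟩ (hnot r')
  · rename_i x c' r' hprev heq
    injection heq with h1 h2
    subst h1; subst h2; rfl

lemma pv_go_rn (isB : Char → Bool) (rest : List Char) (cur : List Char) (acc : List (List Char)) :
    PySem.Chars.splitlines.go isB ('\r' :: '\n' :: rest) cur acc =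
      PySem.Chars.splitlines.go isB rest [] (cur.reverse :: acc) := by
  rw [PySem.Chars.splitlines.go.eq_def]
  split
  · rename_i heq; exact absurd heq (by simp)
  · rename_i x r' heq
    injection heq with h1 h2
    injection h2 with h2a h2b
    subst h2b
    rfl
  · rename_i x c' r' hprev heq
    injection heq with h1 h2
    exact (hprev rest h1.symm h2.symm).elim

lemma pv_go_nil (isB : Char → Bool) (cur : List Char) (acc : List (List Char)) :
    PySem.Chars.splitlines.go isB [] cur acc =
      if cur.isEmpty then acc.reverse else (cur.reverse :: acc).reverse := by
  rw [PySem.Chars.splitlines.go.eq_def]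

lemma pvH_snoc (c : Char) (rest : List Char) (p : List Char)
    (hnot : ∀ r', ¬(c = '\r' ∧ rest = '\n' :: r')) (hc : ¬(c = '\n' ∨ c = '\r')) :
    pvH p (c :: rest) = pvH (p ++ [c]) rest := by
  unfold pvH
  rw [pvParts_cons c rest hnot, if_neg (by push_neg at hc; simp [hc.1, hc.2])]
  cases hpr : pvParts rest with
  | nil => simp
  | cons q tl => obtain ⟨l, s⟩ := q; simp

lemma pv_go_eq (isB : Char → Bool) (cs : List Char)
    (hB : ∀ c ∈ cs, isB c = (c == '\n' || c == '\r')) :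
    ∀ (cur : List Char) (acc : List (List Char)), PySem.Chars.splitlines.go isB cs cur acc
      = acc.reverse ++ pvH cur.reverse cs := by
  induction cs using pvParts.induct with
  | case1 =>
    intro cur acc
    rw [pv_go_nil]
    unfold pvH
    simp only [pvParts]
    by_cases hcur : cur = []
    · simp [hcur]
    · have : cur.reverse ≠ [] := by simpa using hcur
      simp [List.isEmpty_iff, hcur, this]
  | case2 rest ih =>
    intro cur acc
    have hB' : ∀ c ∈ rest, isB c = (c == '\n' || c == '\r') := fun c hc => hB c (by simp [hc])
    rw [pv_go_rn, ih hB']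
    simp only [List.reverse_nil]
    rw [pvH_nil]
    unfold pvH
    rw [show pvParts ('\r' :: '\n' :: rest) = ([], ['\r', '\n']) :: pvParts rest from by rw [pvParts]]
    simp
  | case3 c rest hne2 hbrk ih =>
    intro cur acc
    have hnot : ∀ r', ¬(c = '\r' ∧ rest = '\n' :: r') := fun r' h => hne2 r' h.1 h.2
    have hB' : ∀ c ∈ rest, isB c = (c == '\n' || c == '\r') := fun d hd => hB d (by simp [hd])
    have hisB : isB c = true := by rw [hB c (by simp)]; simpa using hbrk
    rw [pv_go_cons isB c rest cur acc hnot, if_pos hisB, ih hB']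
    simp only [List.reverse_nil]
    rw [pvH_nil]
    unfold pvH
    rw [pvParts_cons c rest hnot, if_pos hbrk]
    simp
  | case4 c rest hne2 hbrk ihnil ih =>
    intro cur acc
    have hnot : ∀ r', ¬(c = '\r' ∧ rest = '\n' :: r') := fun r' h => hne2 r' h.1 h.2
    have hB' : ∀ c ∈ rest, isB c = (c == '\n' || c == '\r') := fun d hd => hB d (by simp [hd])
    have hisB : isB c = false := by rw [hB c (by simp)]; simpa using hbrk
    rw [pv_go_cons isB c rest cur acc hnot, if_neg (by simp [hisB]), ih hB',
        pvH_snoc c rest cur.reverse hnot (by simpa using hbrk)]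
    simp
  | case5 c rest hne2 hbrk l s tl hrest ih =>
    intro cur acc
    have hnot : ∀ r', ¬(c = '\r' ∧ rest = '\n' :: r') := fun r' h => hne2 r' h.1 h.2
    have hB' : ∀ c ∈ rest, isB c = (c == '\n' || c == '\r') := fun d hd => hB d (by simp [hd])
    have hisB : isB c = false := by rw [hB c (by simp)]; simpa using hbrk
    rw [pv_go_cons isB c rest cur acc hnot, if_neg (by simp [hisB]), ih hB',
        pvH_snoc c rest cur.reverse hnot (by simpa using hbrk)]
    simp

lemma pv_isB_dom (c : Char) (hc : pvDomChar c = true) :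
    (decide (c.toNat = 10) || decide (c.toNat = 13) || decide (c.toNat = 11) || decide (c.toNat = 12)
      || decide (c.toNat = 28) || decide (c.toNat = 29) || decide (c.toNat = 30)
      || decide (c.toNat = 133) || decide (c.toNat = 8232) || decide (c.toNat = 8233))
    = (c == '\n' || c == '\r') := by
  have hn : ('\n' : Char).toNat = 10 := rfl
  have hr : ('\r' : Char).toNat = 13 := rfl
  have hinj : ∀ d : Char, c.toNat = d.toNat → c = d := by
    intro d h
    exact Char.ext (by
      have h1 : c.val.toNat = d.val.toNat := h
      exact UInt32.toNat_inj.mp h1)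
  unfold pvDomChar at hc
  by_cases h10 : c.toNat = 10
  · have : c = '\n' := hinj '\n' (by rw [h10]; rfl)
    simp [this]
  · by_cases h13 : c.toNat = 13
    · have : c = '\r' := hinj '\r' (by rw [h13]; rfl)
      simp [this]
    · have hcn : ¬ c = '\n' := fun h => h10 (by rw [h]; rfl)
      have hcr : ¬ c = '\r' := fun h => h13 (by rw [h]; rfl)
      have hrange : ((32 ≤ c.toNat ∧ c.toNat ≤ 126 ∨ c.toNat = 9) ∨ c.toNat = 10) ∨ c.toNat = 13 := by
        simpa using hc
      have h11 : ¬ c.toNat = 11 := by omega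
      have h12 : ¬ c.toNat = 12 := by omega
      have h28 : ¬ c.toNat = 28 := by omega
      have h29 : ¬ c.toNat = 29 := by omega
      have h30 : ¬ c.toNat = 30 := by omega
      have h133 : ¬ c.toNat = 133 := by omega
      have h8232 : ¬ c.toNat = 8232 := by omega
      have h8233 : ¬ c.toNat = 8233 := by omega
      simp [h10, h13, h11, h12, h28, h29, h30, h133, h8232, h8233, hcn, hcr]

lemma pv_splitlines_eq (cs : List Char) (hDom : ∀ c ∈ cs, pvDomChar c = true) :
    PySem.Chars.splitlines cs = (pvParts cs).map Prod.fst := by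
  unfold PySem.Chars.splitlines
  rw [pv_go_eq _ cs (fun c hc => pv_isB_dom c (hDom c hc)) [] []]
  simpa using pvH_nil cs

-- every terminator pvParts produces is [], one char, or "\r\n"
lemma pvParts_sep_shape (cs : List Char) :
    ∀ p ∈ pvParts cs, p.2 = [] ∨ p.2.length = 1 ∨ p.2 = ['\r', '\n'] := by
  induction cs using pvParts.induct with
  | case1 => simp [pvParts]
  | case2 rest ih =>
    intro p hp
    rw [show pvParts ('\r' :: '\n' :: rest) = ([], ['\r', '\n']) :: pvParts rest from by rw [pvParts]] at hp
    rcases List.mem_cons.mp hp with h | h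
    · subst h; simp
    · exact ih p h
  | case3 c rest hne2 hbrk ih =>
    intro p hp
    rw [pvParts_cons c rest (fun r' h => hne2 r' h.1 h.2), if_pos hbrk] at hp
    rcases List.mem_cons.mp hp with h | h
    · subst h; simp
    · exact ih p h
  | case4 c rest hne2 hbrk hrest ih =>
    intro p hp
    rw [pvParts_cons c rest (fun r' h => hne2 r' h.1 h.2), if_neg hbrk, hrest] at hp
    rcases List.mem_cons.mp hp with h | h
    · subst h; simp
    · simp at h
  | case5 c rest hne2 hbrk l s tl hrest ih =>
    intro p hp
    rw [pvParts_cons c rest (fun r' h => hne2 r' h.1 h.2), if_neg hbrk, hrest] at hp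
    rcases List.mem_cons.mp hp with h | h
    · subst h
      have := ih (l, s) (by rw [hrest]; simp)
      simpa using this
    · exact ih p (by rw [hrest]; simp [h])

-- only the very last part can have an empty terminator
lemma pv_mem_dropLast_cons {α : Type} (a : α) (tl : List α) (p : α)
    (hp : p ∈ (a :: tl).dropLast) : tl ≠ [] ∧ (p = a ∨ p ∈ tl.dropLast) := by
  cases tl with
  | nil => simp at hp
  | cons b bs =>
    refine ⟨by simp, ?_⟩
    rw [List.dropLast_cons₂] at hp
    rcases List.mem_cons.mp hp with h | h
    · exact Or.inl h
    · exact Or.inr h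

lemma pvParts_sep_ne_nil (cs : List Char) :
    ∀ p ∈ (pvParts cs).dropLast, p.2 ≠ [] := by
  induction cs using pvParts.induct with
  | case1 => simp [pvParts]
  | case2 rest ih =>
    intro p hp
    rw [show pvParts ('\r' :: '\n' :: rest) = ([], ['\r', '\n']) :: pvParts rest from by rw [pvParts]] at hp
    obtain ⟨-, h⟩ := pv_mem_dropLast_cons _ _ _ hp
    rcases h with h | h
    · subst h; simp
    · exact ih p h
  | case3 c rest hne2 hbrk ih =>
    intro p hp
    rw [pvParts_cons c rest (fun r' h => hne2 r' h.1 h.2), if_pos hbrk] at hp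
    obtain ⟨-, h⟩ := pv_mem_dropLast_cons _ _ _ hp
    rcases h with h | h
    · subst h; simp
    · exact ih p h
  | case4 c rest hne2 hbrk hrest ih =>
    intro p hp
    rw [pvParts_cons c rest (fun r' h => hne2 r' h.1 h.2), if_neg hbrk, hrest] at hp
    simp at hp
  | case5 c rest hne2 hbrk l s tl hrest ih =>
    intro p hp
    rw [pvParts_cons c rest (fun r' h => hne2 r' h.1 h.2), if_neg hbrk, hrest] at hp
    obtain ⟨htl, h⟩ := pv_mem_dropLast_cons _ _ _ hp
    rcases h with h | h
    · subst h
      have : (l, s) ∈ (pvParts rest).dropLast := by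
        rw [hrest]
        cases tl with
        | nil => exact absurd rfl htl
        | cons b bs => rw [List.dropLast_cons₂]; exact List.mem_cons_self
      exact ih (l, s) this
    · have : p ∈ (pvParts rest).dropLast := by
        rw [hrest]
        cases tl with
        | nil => simp at h
        | cons b bs => rw [List.dropLast_cons₂]; exact List.mem_cons_of_mem _ h
      exact ih p this

-- the alt port, rewritten through the structural parts scan (used for the witness too)
lemma pv_alt_eq (target : List String) (template_text : String) :
    find_target_location_alt target template_text =
      match PySem.List.pyGet? target 1 with
      | none => 0
      | some tgt =>
        match pvPartsScan tgt.toList (pvParts template_text.toList) 0 with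
        | some v => v
        | none => PySem.Str.find template_text tgt := by
  unfold find_target_location_alt
  cases PySem.List.pyGet? target 1 with
  | none => rfl
  | some tgt => simp only [pvScanGo_eq tgt.toList template_text.toList 0, List.drop_zero]

lemma pv_find_strip_nonneg_chars (l tgt : List Char) (h : PySem.Chars.strip l = tgt) :
    0 ≤ PySem.Chars.find l tgt := by
  rw [PySem.Chars.find_nonneg_iff, ← h]
  exact pv_strip_infix l

lemma pv_sumA_nonneg (ps : List (List Char × List Char)) :
    0 ≤ (ps.map (fun p => (p.1.length : Int) + 1)).sum := by
  apply List.sum_nonneg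
  intro x hx
  simp only [List.mem_map] at hx
  obtain ⟨p, _, rfl⟩ := hx
  positivity

lemma pv_sum_le (ps : List (List Char × List Char)) (hne : ∀ p ∈ ps, p.2 ≠ []) :
    (ps.map (fun p => (p.1.length : Int) + 1)).sum
      ≤ (ps.map (fun p => (p.1.length : Int) + p.2.length)).sum := by
  induction ps with
  | nil => simp
  | cons q qs ih =>
    have h1 : 1 ≤ (q.2.length : Int) := by
      have := hne q (by simp)
      have : 0 < q.2.length := List.length_pos_iff.mpr this
      omega
    have h2 := ih (fun p hp => hne p (by simp [hp]))
    simp only [List.map_cons, List.sum_cons]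
    omega

lemma pv_sum_lt (ps : List (List Char × List Char)) (hne : ∀ p ∈ ps, p.2 ≠ [])
    (hex : ∃ p ∈ ps, p.2 = ['\r', '\n']) :
    (ps.map (fun p => (p.1.length : Int) + 1)).sum
      < (ps.map (fun p => (p.1.length : Int) + p.2.length)).sum := by
  induction ps with
  | nil => simp at hex
  | cons q qs ih =>
    simp only [List.map_cons, List.sum_cons]
    obtain ⟨p, hp, hprn⟩ := hex
    rcases List.mem_cons.mp hp with h | h
    · subst h
      have h1 : (p.2.length : Int) = 2 := by rw [hprn]; rfl
      have h2 := pv_sum_le qs (fun r hr => hne r (by simp [hr]))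
      omega
    · have h1 : 1 ≤ (q.2.length : Int) := by
        have := hne q (by simp)
        have : 0 < q.2.length := List.length_pos_iff.mpr this
        omega
      have h2 := ih (fun r hr => hne r (by simp [hr])) ⟨p, h, hprn⟩
      omega

-- A's loop, characterised at the level of pvParts (needs Dom for splitlines ↔ pvParts)
lemma pvA_char (tgt template_text : String)
    (hDomStr : ∀ c ∈ template_text.toList, pvDomChar c = true) :
    pvLoopA tgt 0 (PySem.Str.splitlines template_text) =
      match (pvParts template_text.toList).findIdx? (fun p => PySem.Chars.strip p.1 == tgt.toList) with
      | none => -1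
      | some i => (((pvParts template_text.toList).take i).map (fun p => (p.1.length : Int) + 1)).sum
          + PySem.Chars.find ((pvParts template_text.toList).getD i ([], [])).1 tgt.toList := by
  have hmap : (PySem.Str.splitlines template_text).map String.toList
      = (pvParts template_text.toList).map Prod.fst := by
    rw [PySem.Str.splitlines_map_toList]
    exact pv_splitlines_eq _ hDomStr
  have hpred : (fun l => PySem.Str.strip l == tgt)
      = (fun l : String => PySem.Chars.strip l.toList == tgt.toList) := by
    funext l
    by_cases h : PySem.Str.strip l = tgt
    · have h2 : PySem.Chars.strip l.toList = tgt.toList := by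
        rw [← PySem.Str.toList_strip, h]
      simp [h, h2]
    · have h2 : ¬ PySem.Chars.strip l.toList = tgt.toList := by
        intro hco
        exact h (String.toList_inj.mp (by rw [PySem.Str.toList_strip, hco]))
      simp [h, h2]
  rw [pv_loopA_eq, hpred]
  have hidx : (PySem.Str.splitlines template_text).findIdx?
        (fun l : String => PySem.Chars.strip l.toList == tgt.toList)
      = (pvParts template_text.toList).findIdx? (fun p => PySem.Chars.strip p.1 == tgt.toList) := by
    have h1 : (fun l : String => PySem.Chars.strip l.toList == tgt.toList)
        = ((fun lc : List Char => PySem.Chars.strip lc == tgt.toList) ∘ String.toList) := rfl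
    rw [h1, ← List.findIdx?_map, hmap, List.findIdx?_map]
    rfl
  rw [hidx]
  cases hfi : (pvParts template_text.toList).findIdx? (fun p => PySem.Chars.strip p.1 == tgt.toList) with
  | none => rfl
  | some i =>
    have hilt : i < (pvParts template_text.toList).length :=
      (List.findIdx?_eq_some_iff_getElem.mp hfi).1
    have hlen : (PySem.Str.splitlines template_text).length = (pvParts template_text.toList).length := by
      have h := congrArg List.length hmap
      simp only [List.length_map] at h
      exact h
    simp only [zero_add]
    have hsum : ((PySem.Str.splitlines template_text).take i).map (fun l => PySem.Str.len l + 1)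
        = ((pvParts template_text.toList).take i).map (fun p => (p.1.length : Int) + 1) := by
      have h2 : (fun l : String => PySem.Str.len l + 1)
          = ((fun lc : List Char => (lc.length : Int) + 1) ∘ String.toList) := by
        funext l
        simp [PySem.Str.len_eq]
      rw [h2, ← List.map_map, List.map_take, hmap, ← List.map_take, List.map_map]
      rfl
    have hgl : ((PySem.Str.splitlines template_text).getD i "").toList
        = ((pvParts template_text.toList).getD i ([], [])).1 := by
      rw [List.getD_eq_getElem?_getD, List.getD_eq_getElem?_getD,
          List.getElem?_eq_getElem (by omega : i < (PySem.Str.splitlines template_text).length),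
          List.getElem?_eq_getElem hilt]
      simp only [Option.getD_some]
      have h := congrArg (fun l => l[i]?) hmap
      simp only [List.getElem?_map] at h
      rw [List.getElem?_eq_getElem (by omega : i < (PySem.Str.splitlines template_text).length),
          List.getElem?_eq_getElem hilt] at h
      simpa using h
    rw [hsum]
    congr 1
    rw [PySem.Str.find_eq, hgl]

-- both ports, reduced to the common pvParts view; the two sums differ only in the
-- "+1 vs +(terminator length)" per preceding line
theorem pv_main (target : List String) (template_text : String)
    (hDom : Dom_find_target_location target template_text) :
    ∀ tgt, PySem.List.pyGet? target 1 = some tgt →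
    ∀ i, (pvParts template_text.toList).findIdx? (fun p => PySem.Chars.strip p.1 == tgt.toList) = some i →
      find_target_location target template_text
        = (((pvParts template_text.toList).take i).map (fun p => (p.1.length : Int) + 1)).sum
          + PySem.Chars.find ((pvParts template_text.toList).getD i ([], [])).1 tgt.toList
      ∧ find_target_location_alt target template_text
        = (((pvParts template_text.toList).take i).map (fun p => (p.1.length : Int) + p.2.length)).sum
          + PySem.Chars.find ((pvParts template_text.toList).getD i ([], [])).1 tgt.toList := by
  intro tgt hget i hfi
  have hDomStr : ∀ c ∈ template_text.toList, pvDomChar c = true := by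
    unfold Dom_find_target_location at hDom
    simp only [Bool.and_eq_true] at hDom
    have h := hDom.2
    unfold pvDomStr at h
    simpa [List.all_eq_true] using h
  have hilt : i < (pvParts template_text.toList).length :=
    (List.findIdx?_eq_some_iff_getElem.mp hfi).1
  have hstrip : PySem.Chars.strip ((pvParts template_text.toList).getD i ([], [])).1 = tgt.toList := by
    obtain ⟨hlt, hp, -⟩ := List.findIdx?_eq_some_iff_getElem.mp hfi
    rw [List.getD_eq_getElem _ _ hlt]
    exact eq_of_beq hp
  have hfind0 : 0 ≤ PySem.Chars.find ((pvParts template_text.toList).getD i ([], [])).1 tgt.toList :=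
    pv_find_strip_nonneg_chars _ _ hstrip
  constructor
  · unfold find_target_location
    rw [hget]
    simp only [pvA_char tgt template_text hDomStr, hfi]
    have hnn := pv_sumA_nonneg ((pvParts template_text.toList).take i)
    have hsum0 : (0 : Int) ≤ (((pvParts template_text.toList).take i).map (fun p => (p.1.length : Int) + 1)).sum
        + PySem.Chars.find ((pvParts template_text.toList).getD i ([], [])).1 tgt.toList :=
      add_nonneg hnn hfind0
    rw [if_neg (by
      simp only [beq_iff_eq]
      intro hcontra
      rw [hcontra] at hsum0
      norm_num at hsum0)]
  · rw [pv_alt_eq, hget]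
    simp only [pvPartsScan_eq, hfi]
    simp

-- when no line matches, both ports fall back to template_text.find(target[1])
theorem pv_main_none (target : List String) (template_text : String)
    (hDom : Dom_find_target_location target template_text) :
    ∀ tgt, PySem.List.pyGet? target 1 = some tgt →
    (pvParts template_text.toList).findIdx? (fun p => PySem.Chars.strip p.1 == tgt.toList) = none →
      find_target_location target template_text = PySem.Str.find template_text tgt
      ∧ find_target_location_alt target template_text = PySem.Str.find template_text tgt := by
  intro tgt hget hfi
  have hDomStr : ∀ c ∈ template_text.toList, pvDomChar c = true := by
    unfold Dom_find_target_location at hDom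
    simp only [Bool.and_eq_true] at hDom
    have h := hDom.2
    unfold pvDomStr at h
    simpa [List.all_eq_true] using h
  constructor
  · unfold find_target_location
    rw [hget]
    simp only [pvA_char tgt template_text hDomStr, hfi]
    simp
  · rw [pv_alt_eq, hget]
    simp only [pvPartsScan_eq, hfi]

lemma pv_take_sep_facts (template_text : String) (tgt : List Char) (i : Nat)
    (hfi : (pvParts template_text.toList).findIdx? (fun p => PySem.Chars.strip p.1 == tgt) = some i) :
    ∀ p ∈ (pvParts template_text.toList).take i, p.2 ≠ [] := by
  intro p hp
  have hilt : i < (pvParts template_text.toList).length :=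
    (List.findIdx?_eq_some_iff_getElem.mp hfi).1
  have hsub : p ∈ (pvParts template_text.toList).dropLast := by
    have h1 : (pvParts template_text.toList).take i
        = ((pvParts template_text.toList).dropLast).take i := by
      rw [List.dropLast_eq_take, List.take_take]
      congr 1
      omega
    rw [h1] at hp
    exact List.mem_of_mem_take hp
  exact pvParts_sep_ne_nil _ p hsub

-- ===== VERDICT (by name: the statement is the Claim_ definition above) =====
theorem find_target_location_spec : Claim_unchanged_find_target_location := by
  intro target template_text hDom hPre
  unfold Spec_find_target_location
  intro hD
  unfold D_find_target_location pvD at hD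
  cases hget : PySem.List.pyGet? target 1 with
  | none =>
    unfold find_target_location
    rw [pv_alt_eq, hget]
  | some tgt =>
    simp only [hget] at hD
    cases hfi : (pvParts template_text.toList).findIdx? (fun p => PySem.Chars.strip p.1 == tgt.toList) with
    | none =>
      obtain ⟨hA, hB⟩ := pv_main_none target template_text hDom tgt hget hfi
      rw [hA, hB]
    | some i =>
      obtain ⟨hA, hB⟩ := pv_main target template_text hDom tgt hget i hfi
      rw [hA, hB]
      simp only [hfi] at hD
      have hany : ((pvParts template_text.toList).take i).any (fun p => p.2 == ['\r', '\n']) = false := by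
        cases h : ((pvParts template_text.toList).take i).any (fun p => p.2 == ['\r', '\n']) with
        | true => exact absurd h hD
        | false => rfl
      have hsep1 : ∀ p ∈ (pvParts template_text.toList).take i, ((p.1.length : Int) + 1) = ((p.1.length : Int) + p.2.length) := by
        intro p hp
        have hne := pv_take_sep_facts template_text tgt.toList i hfi p hp
        have hshape := pvParts_sep_shape template_text.toList p (List.mem_of_mem_take hp)
        have hnotrn : ¬ p.2 = ['\r', '\n'] := by
          intro hco
          have := List.any_eq_false.mp hany p hp
          simp [hco] at this
        rcases hshape with h | h | h
        · exact absurd h hne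
        · rw [h]; simp
        · exact absurd h hnotrn
      congr 1
      exact congrArg List.sum (List.map_congr_left hsep1)

theorem find_target_location_changed : Claim_changed_find_target_location := by
  unfold Claim_changed_find_target_location
  refine ⟨by decide, by decide, by decide, by decide, ?_, by decide⟩
  rw [pv_alt_eq]
  decide

theorem find_target_location_tight : Claim_exact_find_target_location := by
  intro target template_text hDom hPre hD
  unfold D_find_target_location pvD at hD
  cases hget : PySem.List.pyGet? target 1 with
  | none => simp only [hget] at hD; simp at hD
  | some tgt =>
    simp only [hget] at hD
    cases hfi : (pvParts template_text.toList).findIdx? (fun p => PySem.Chars.strip p.1 == tgt.toList) with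
    | none => simp only [hfi] at hD; simp at hD
    | some i =>
      simp only [hfi] at hD
      obtain ⟨hA, hB⟩ := pv_main target template_text hDom tgt hget i hfi
      rw [hA, hB]
      have hex : ∃ p ∈ (pvParts template_text.toList).take i, p.2 = ['\r', '\n'] := by
        obtain ⟨p, hp, hpe⟩ := List.any_eq_true.mp hD
        exact ⟨p, hp, by simpa using hpe⟩
      have hlt := pv_sum_lt ((pvParts template_text.toList).take i)
        (pv_take_sep_facts template_text tgt.toList i hfi) hex
      omega
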